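-- pv_equiv track=rewrite | github.com/kirillvititnev/mooreDiagrams | main_2.py | equivalence_classes
-- ===== SOURCE A (Python) =====
-- def equivalence_classes(fsm):
--     classes = {}
--     representatives = {}  # Словарь для хранения представителей классов
--     for state, transitions in fsm.items():
--         signature = tuple(sorted(transitions.items()))
--         # Найдем представителя класса эквивалентности для текущего состояния
--         representative = representatives.get(signature)
--         if representative is None:
--             # Если класс эквивалентности с такой подписью еще не существует,
--             # то текущее состояние становится его представителем
--             representative = state
--             representatives[signature] = representative
--         # Добавляем текущее состояние в соответствующий класс эквивалентности
--         if representative not in classes: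
--             classes[representative] = [state]
--         else:
--             classes[representative].append(state)
--     return classes, representatives
-- ===== SOURCE B (Python) =====
-- def equivalence_classes(fsm):
--     # Staged brute-force version: pair states with signatures, keep the states whose
--     # signature has no earlier occurrence, then rescan the whole list per representative.
--     pairs = [(state, tuple(sorted(tr.items()))) for state, tr in fsm.items()]
--     rep_pairs = [(s, g) for i, (s, g) in enumerate(pairs)
--                  if all(h != g for _, h in pairs[:i])]
--     classes = {r: [s for s, g in pairs if g == rg] for r, rg in rep_pairs}
--     representatives = {rg: r for r, rg in rep_pairs}
--     return classes, representatives
-- ===== Notes on version B (the rewrite author's own statement) =====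
-- stated objective: alternative
-- what changed: B drops A's dict-indexed single pass entirely: it pairs each state with its signature, selects representatives by a brute-force scan of the earlier prefix (no signature index), and then rebuilds each class by rescanning the whole pair list per representative.
import Mathlib
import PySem

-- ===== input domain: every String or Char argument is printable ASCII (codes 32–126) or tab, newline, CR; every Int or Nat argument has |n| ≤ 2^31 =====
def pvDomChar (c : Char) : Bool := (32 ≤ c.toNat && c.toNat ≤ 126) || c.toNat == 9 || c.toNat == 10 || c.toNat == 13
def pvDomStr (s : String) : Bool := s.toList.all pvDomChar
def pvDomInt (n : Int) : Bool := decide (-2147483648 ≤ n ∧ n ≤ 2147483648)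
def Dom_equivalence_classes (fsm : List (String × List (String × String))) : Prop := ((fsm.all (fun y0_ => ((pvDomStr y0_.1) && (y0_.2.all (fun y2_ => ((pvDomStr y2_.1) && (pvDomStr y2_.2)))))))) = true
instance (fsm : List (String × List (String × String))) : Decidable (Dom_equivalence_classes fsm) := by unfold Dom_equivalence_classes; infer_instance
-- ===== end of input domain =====

-- B replaces A's single dict-indexed pass by staged brute-force passes: pair each state
-- with its signature, keep the states whose signature has no earlier occurrence, then
-- rescan the whole list per representative (objective: alternative; quadratic, no index).

-- ===== PORT A =====
-- shared helper: tuple(sorted(transitions.items())) — Python's lexicographic sort of string pairs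
def sigOf (tr : List (String × String)) : List (String × String) :=
  PySem.List.sorted2 tr Prod.fst Prod.snd false

-- the body of A's for-loop, acting on the pair (classes, representatives)
def stepA (cr : PySem.Dict String (List String) × PySem.Dict (List (String × String)) String)
    (p : String × List (String × String)) :
    PySem.Dict String (List String) × PySem.Dict (List (String × String)) String :=
  let signature := sigOf p.2
  match cr.2.get? signature with
  | some r =>
      -- representative already exists
      if cr.1.contains r then (cr.1.insert r (cr.1.getD r [] ++ [p.1]), cr.2)
      else (cr.1.insert r [p.1], cr.2)
  | none =>
      -- current state becomes the representative
      let reps := cr.2.insert signature p.1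
      if cr.1.contains p.1 then (cr.1.insert p.1 (cr.1.getD p.1 [] ++ [p.1]), reps)
      else (cr.1.insert p.1 [p.1], reps)

def equivalence_classes (fsm : List (String × List (String × String))) :
    (List (String × List String)) × (List (List (String × String) × String)) :=
  let res := fsm.foldl stepA (PySem.Dict.empty, PySem.Dict.empty)
  (res.1.items, res.2.items)

-- ===== PORT B =====
def equivalence_classes_alt (fsm : List (String × List (String × String))) :
    (List (String × List String)) × (List (List (String × String) × String)) :=
  -- pairs = [(state, tuple(sorted(tr.items()))) for state, tr in fsm.items()]
  let pairs := fsm.map (fun p => (p.1, sigOf p.2))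
  -- rep_pairs = [(s, g) for i, (s, g) in enumerate(pairs) if all(h != g for _, h in pairs[:i])]
  let rep_pairs := ((PySem.List.enumerate pairs).filter
      (fun ip => (PySem.List.slice pairs none (some ip.1)).all (fun q => q.2 != ip.2.2))).map Prod.snd
  -- classes = {r: [s for s, g in pairs if g == rg] for r, rg in rep_pairs}
  -- representatives = {rg: r for r, rg in rep_pairs}
  ((rep_pairs.foldl (fun (d : PySem.Dict String (List String)) r =>
        d.insert r.1 ((pairs.filter (fun q => q.2 == r.2)).map Prod.fst)) PySem.Dict.empty).items,
   (rep_pairs.foldl (fun (d : PySem.Dict (List (String × String)) String) r =>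
        d.insert r.2 r.1) PySem.Dict.empty).items)

-- ===== PRECONDITION & SPEC =====
-- Pre_ restricts to association lists that actually encode A's dict-of-dicts argument:
-- no duplicate state keys and no duplicate input symbols inside a state's transition dict
-- (a Python dict can never present duplicate keys to A, so no input A receives is excluded).
def Pre_equivalence_classes (fsm : List (String × List (String × String))) : Prop :=
  (fsm.map Prod.fst).Nodup ∧ ∀ p ∈ fsm, (p.2.map Prod.fst).Nodup
instance (fsm : List (String × List (String × String))) : Decidable (Pre_equivalence_classes fsm) := by
  unfold Pre_equivalence_classes; infer_instance

def pvWitness_equivalence_classes : (List (String × List (String × String))) :=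
  [("a", [("x", "b"), ("y", "a")]), ("b", [("y", "a"), ("x", "b")]), ("c", [])]

def Spec_equivalence_classes (fsm : List (String × List (String × String))) (out : (List (String × List String)) × (List (List (String × String) × String))) : Prop := out = equivalence_classes_alt fsm
instance (fsm : List (String × List (String × String))) (out : (List (String × List String)) × (List (List (String × String) × String))) : Decidable (Spec_equivalence_classes fsm out) := by unfold Spec_equivalence_classes; infer_instance

-- ===== CLAIM (what is proved, stated in full; the proofs are below) =====
def Claim_equal_equivalence_classes : Prop := ∀ (fsm : List (String × List (String × String))), Dom_equivalence_classes fsm → Pre_equivalence_classes fsm → Spec_equivalence_classes fsm (equivalence_classes fsm)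

-- ===== LEMMAS AND PROOFS =====

-- the signatures of l in first-occurrence order
def sigOrder (l : List (String × List (String × String))) : List (List (String × String)) :=
  PySem.List.dedup (l.map (fun p => sigOf p.2))

-- the states of l whose signature is s, in order
def sigMems (l : List (String × List (String × String))) (s : List (String × String)) : List String :=
  (l.filter (fun p => sigOf p.2 == s)).map Prod.fst

def sigFirst (l : List (String × List (String × String))) (s : List (String × String)) : String :=
  (sigMems l s).headD ""

lemma mem_sigOrder_iff (l : List (String × List (String × String))) (s : List (String × String)) :
    s ∈ sigOrder l ↔ ∃ p ∈ l, sigOf p.2 = s := by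
  simp [sigOrder, PySem.List.dedup_eq_ofList, PySem.Set.mem_ofList]

lemma sigMems_ne_nil_of_mem_sigOrder {l : List (String × List (String × String))}
    {s : List (String × String)} (h : s ∈ sigOrder l) : sigMems l s ≠ [] := by
  rcases (mem_sigOrder_iff l s).1 h with ⟨p, hp, hs⟩
  have : p.1 ∈ sigMems l s := by
    simp only [sigMems, List.mem_map]
    exact ⟨p, List.mem_filter.2 ⟨hp, by simp [hs]⟩, rfl⟩
  intro hnil; rw [hnil] at this; simp at this

lemma sigFirst_mem_mems {l : List (String × List (String × String))}
    {s : List (String × String)} (h : s ∈ sigOrder l) : sigFirst l s ∈ sigMems l s := by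
  have hne := sigMems_ne_nil_of_mem_sigOrder h
  cases hm : sigMems l s with
  | nil => exact absurd hm hne
  | cons a t => simp [sigFirst, hm]

lemma mems_subset_states {l : List (String × List (String × String))}
    {s : List (String × String)} {x : String} (h : x ∈ sigMems l s) : x ∈ l.map Prod.fst := by
  simp only [sigMems, List.mem_map] at h
  rcases h with ⟨p, hp, rfl⟩
  exact List.mem_map.2 ⟨p, (List.mem_filter.1 hp).1, rfl⟩

lemma sig_of_mem_mems {l : List (String × List (String × String))}
    {s : List (String × String)} {x : String} (h : x ∈ sigMems l s) :
    ∃ p ∈ l, p.1 = x ∧ sigOf p.2 = s := by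
  simp only [sigMems, List.mem_map] at h
  rcases h with ⟨p, hp, rfl⟩
  rcases List.mem_filter.1 hp with ⟨hmem, hsig⟩
  exact ⟨p, hmem, rfl, by simpa using hsig⟩

-- with distinct states, a state belongs to the member list of at most one signature
lemma sigFirst_inj {l : List (String × List (String × String))}
    (h : (l.map Prod.fst).Nodup) {s t : List (String × String)}
    (hs : s ∈ sigOrder l) (ht : t ∈ sigOrder l) (he : sigFirst l s = sigFirst l t) : s = t := by
  rcases sig_of_mem_mems (sigFirst_mem_mems hs) with ⟨p, hp, hp1, hps⟩
  rcases sig_of_mem_mems (sigFirst_mem_mems ht) with ⟨q, hq, hq1, hqt⟩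
  have hpq : p = q := List.inj_on_of_nodup_map h hp hq (by rw [hp1, hq1]; exact he)
  rw [← hps, hpq, hqt]

lemma nodup_sigOrder (l : List (String × List (String × String))) : (sigOrder l).Nodup := by
  simp only [sigOrder, PySem.List.dedup_eq_ofList]
  exact PySem.Set.nodup_ofList _

lemma nodup_heads {l : List (String × List (String × String))}
    (h : (l.map Prod.fst).Nodup) : ((sigOrder l).map (sigFirst l)).Nodup :=
  List.Nodup.map_on (fun _ hs _ ht he => sigFirst_inj h hs ht he) (nodup_sigOrder l)

lemma sigMems_append_singleton (l : List (String × List (String × String)))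
    (p : String × List (String × String)) (s : List (String × String)) :
    sigMems (l ++ [p]) s = sigMems l s ++ (if sigOf p.2 = s then [p.1] else []) := by
  simp only [sigMems, List.filter_append, List.map_append]
  congr 1
  by_cases hs : sigOf p.2 = s <;> simp [hs]

lemma sigOrder_append_singleton (l : List (String × List (String × String)))
    (p : String × List (String × String)) :
    sigOrder (l ++ [p]) = (PySem.Set.ofList (l.map (fun q => sigOf q.2))).add (sigOf p.2) := by
  simp only [sigOrder, PySem.List.dedup_eq_ofList, List.map_append, List.map_cons, List.map_nil]
  exact PySem.Set.ofList_append_singleton _ _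

lemma sigMems_eq_nil_of_not_mem {l : List (String × List (String × String))}
    {s : List (String × String)} (h : s ∉ sigOrder l) : sigMems l s = [] := by
  rw [sigMems, List.map_eq_nil_iff, List.filter_eq_nil_iff]
  intro p hp hb
  exact h ((mem_sigOrder_iff l s).2 ⟨p, hp, by simpa using hb⟩)

lemma sigOrder_append (l : List (String × List (String × String)))
    (p : String × List (String × String)) :
    sigOrder (l ++ [p])
      = if sigOf p.2 ∈ sigOrder l then sigOrder l else sigOrder l ++ [sigOf p.2] := by
  have hOF : PySem.Set.ofList (l.map (fun q => sigOf q.2)) = sigOrder l := by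
    simp [sigOrder, PySem.List.dedup_eq_ofList]
  rw [sigOrder_append_singleton, PySem.Set.add_eq_ite, hOF]

lemma sigFirst_append_of_mem {l : List (String × List (String × String))}
    {s : List (String × String)} (p : String × List (String × String))
    (h : s ∈ sigOrder l) : sigFirst (l ++ [p]) s = sigFirst l s := by
  unfold sigFirst
  rw [sigMems_append_singleton]
  rcases hm : sigMems l s with _ | ⟨a, t⟩
  · exact absurd hm (sigMems_ne_nil_of_mem_sigOrder h)
  · by_cases hc : sigOf p.2 = s <;> simp [hc]

lemma sigMems_append_of_ne {l : List (String × List (String × String))}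
    {s : List (String × String)} (p : String × List (String × String))
    (h : sigOf p.2 ≠ s) : sigMems (l ++ [p]) s = sigMems l s := by
  rw [sigMems_append_singleton]; simp [h]

-- ========== characterisation of A's fold ==========
lemma foldA_char (l : List (String × List (String × String))) (h : (l.map Prod.fst).Nodup) :
    l.foldl stepA (PySem.Dict.empty, PySem.Dict.empty)
      = (PySem.Dict.mk ((sigOrder l).map (fun s => (sigFirst l s, sigMems l s))),
         PySem.Dict.mk ((sigOrder l).map (fun s => (s, sigFirst l s)))) := by
  induction l using List.reverseRecOn with
  | nil => rfl
  | append_singleton l p ih =>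
    have h' : (l.map Prod.fst ++ [p.1]).Nodup := by simpa using h
    obtain ⟨h1, _, hdisj⟩ := List.nodup_append.1 h'
    have hp1 : p.1 ∉ l.map Prod.fst := fun hx => hdisj _ hx p.1 (by simp) rfl
    have hndO := nodup_sigOrder l
    have hndH := nodup_heads h1
    have hkeys2 : (PySem.Dict.mk ((sigOrder l).map (fun s => (s, sigFirst l s)))).keys
        = sigOrder l := by
      simp [PySem.Dict.keys, List.map_map, Function.comp_def]
    have hkeys1 : (PySem.Dict.mk ((sigOrder l).map (fun s => (sigFirst l s, sigMems l s)))).keys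
        = (sigOrder l).map (sigFirst l) := by
      simp [PySem.Dict.keys, List.map_map, Function.comp_def]
    rw [List.foldl_append, ih h1]
    simp only [List.foldl_cons, List.foldl_nil]
    by_cases hmem : sigOf p.2 ∈ sigOrder l
    · -- signature already known: representative unchanged, its class grows
      have hget : (PySem.Dict.mk ((sigOrder l).map (fun s => (s, sigFirst l s)))).get? (sigOf p.2)
          = some (sigFirst l (sigOf p.2)) :=
        PySem.Dict.get?_of_mem_items
          (PySem.Dict.mk ((sigOrder l).map (fun s => (s, sigFirst l s))))
          (List.mem_map.2 ⟨_, hmem, rfl⟩) (by rw [hkeys2]; exact hndO)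
      have hcont : (PySem.Dict.mk ((sigOrder l).map (fun s => (sigFirst l s, sigMems l s)))).contains
          (sigFirst l (sigOf p.2)) = true := by
        rw [PySem.Dict.contains_eq_decide_mem_keys, hkeys1]
        simp only [decide_eq_true_eq, List.mem_map]
        exact ⟨_, hmem, rfl⟩
      have hgetD : (PySem.Dict.mk ((sigOrder l).map (fun s => (sigFirst l s, sigMems l s)))).getD
          (sigFirst l (sigOf p.2)) [] = sigMems l (sigOf p.2) :=
        PySem.Dict.getD_of_mem_items
          (PySem.Dict.mk ((sigOrder l).map (fun s => (sigFirst l s, sigMems l s))))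
          (List.mem_map.2 ⟨_, hmem, rfl⟩) (by rw [hkeys1]; exact hndH) []
      simp only [stepA, hget, hcont, hgetD, if_true]
      rw [sigOrder_append, if_pos hmem]
      refine Prod.ext ?_ ?_
      · apply PySem.Dict.ext
        rw [PySem.Dict.items_insert_of_contains _ _ hcont]
        show ((sigOrder l).map (fun s => (sigFirst l s, sigMems l s))).map _ = _
        rw [List.map_map]
        refine List.map_congr_left (fun s hs => ?_)
        simp only [Function.comp_def]
        by_cases hse : s = sigOf p.2
        · subst hse
          rw [sigFirst_append_of_mem p hs, sigMems_append_singleton, if_pos rfl]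
          simp
        · have hne : (sigFirst l s == sigFirst l (sigOf p.2)) = false := by
            simp only [beq_eq_false_iff_ne, ne_eq]
            exact fun he => hse (sigFirst_inj h1 hs hmem he)
          rw [hne]
          simp only [Bool.false_eq_true, if_false]
          rw [sigFirst_append_of_mem p hs, sigMems_append_of_ne p (fun he => hse he.symm)]
      · apply PySem.Dict.ext
        show ((sigOrder l).map (fun s => (s, sigFirst l s))) = _
        refine (List.map_congr_left (fun s hs => ?_)).symm
        rw [sigFirst_append_of_mem p hs]
    · -- new signature: current state becomes representative of a fresh class
      have hget : (PySem.Dict.mk ((sigOrder l).map (fun s => (s, sigFirst l s)))).get? (sigOf p.2)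
          = none := by
        rw [PySem.Dict.get?_eq_none_iff_not_mem_keys, hkeys2]; exact hmem
      have hcont : (PySem.Dict.mk ((sigOrder l).map (fun s => (sigFirst l s, sigMems l s)))).contains
          p.1 = false := by
        rw [PySem.Dict.contains_eq_decide_mem_keys, hkeys1]
        simp only [decide_eq_false_iff_not, List.mem_map]
        rintro ⟨s, hs, hfs⟩
        exact hp1 (hfs ▸ mems_subset_states (sigFirst_mem_mems hs))
      have hcont2 : (PySem.Dict.mk ((sigOrder l).map (fun s => (s, sigFirst l s)))).contains
          (sigOf p.2) = false := by
        rw [PySem.Dict.contains_eq_decide_mem_keys, hkeys2]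
        simpa using hmem
      have hmemsp : sigMems (l ++ [p]) (sigOf p.2) = [p.1] := by
        rw [sigMems_append_singleton, if_pos rfl, sigMems_eq_nil_of_not_mem hmem]
        rfl
      have hfirstp : sigFirst (l ++ [p]) (sigOf p.2) = p.1 := by
        rw [sigFirst, hmemsp]; simp
      simp only [stepA, hget, hcont]
      simp only [Bool.false_eq_true, if_false]
      rw [sigOrder_append, if_neg hmem]
      refine Prod.ext ?_ ?_
      · apply PySem.Dict.ext
        rw [PySem.Dict.items_insert_of_not_contains _ _ hcont]
        dsimp only
        rw [List.map_append]
        congr 1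
        · refine (List.map_congr_left (fun s hs => ?_)).symm
          have hse : sigOf p.2 ≠ s := fun he => hmem (he ▸ hs)
          rw [sigFirst_append_of_mem p hs, sigMems_append_of_ne p hse]
        · simp [hfirstp, hmemsp]
      · apply PySem.Dict.ext
        rw [PySem.Dict.items_insert_of_not_contains _ _ hcont2]
        dsimp only
        rw [List.map_append]
        congr 1
        · refine (List.map_congr_left (fun s hs => ?_)).symm
          rw [sigFirst_append_of_mem p hs]
        · simp [hfirstp]

-- ========== characterisation of B's rep_pairs ==========
-- the first-occurrence filter of Source B, over an arbitrary "pairs" list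
def firstOcc {α β : Type} [BEq β] (L : List (α × β)) : List (α × β) :=
  ((PySem.List.enumerate L).filter
      (fun ip => (PySem.List.slice L none (some ip.1)).all (fun q => q.2 != ip.2.2))).map Prod.snd

lemma firstOcc_append {α β : Type} [BEq β] [LawfulBEq β] (L : List (α × β)) (x : α × β) :
    firstOcc (L ++ [x]) = firstOcc L ++ (if x.2 ∈ L.map Prod.snd then [] else [x]) := by
  unfold firstOcc
  rw [PySem.List.enumerate_append, List.filter_append, List.map_append]
  congr 1
  · -- old elements: the prefix they inspect is unchanged
    refine congrArg _ (List.filter_congr (fun ip hip => ?_))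
    rcases (PySem.List.mem_enumerate_iff _ _ _).1 hip with ⟨k, hk, rfl⟩
    have h0 : ((0 : Int) + k) = (k : Int) := by omega
    simp only [h0, PySem.List.slice_to_natCast,
      List.take_append_of_le_length (le_of_lt hk)]
  · -- the new element at index L.length inspects exactly L
    simp only [PySem.List.enumerate_cons, PySem.List.enumerate_nil, List.filter_cons,
      List.filter_nil]
    have h0 : ((0 : Int) + (L.length : Int)) = (L.length : Int) := by omega
    simp only [h0, PySem.List.slice_to_natCast, List.take_left']
    by_cases hm : x.2 ∈ L.map Prod.snd
    · have hball : (L.all (fun q => q.2 != x.2)) = false := by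
        rcases List.mem_map.1 hm with ⟨q, hq, hqe⟩
        exact List.all_eq_false.2 ⟨q, hq, by simp [hqe]⟩
      simp [hball, hm]
    · have hball : (L.all (fun q => q.2 != x.2)) = true :=
        List.all_eq_true.2 (fun q hq => by
          simp only [bne_iff_ne, ne_eq]
          exact fun he => hm (List.mem_map.2 ⟨q, hq, he⟩))
      simp [hball, hm]

lemma mem_sigOrder_iff_mem_map (l : List (String × List (String × String)))
    (s : List (String × String)) :
    s ∈ sigOrder l ↔ s ∈ l.map (fun p => sigOf p.2) := by
  rw [mem_sigOrder_iff]
  constructor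
  · rintro ⟨p, hp, rfl⟩; exact List.mem_map.2 ⟨p, hp, rfl⟩
  · intro h; rcases List.mem_map.1 h with ⟨p, hp, rfl⟩; exact ⟨p, hp, rfl⟩

lemma firstOcc_pairs (l : List (String × List (String × String))) :
    firstOcc (l.map (fun p => (p.1, sigOf p.2)))
      = (sigOrder l).map (fun s => (sigFirst l s, s)) := by
  induction l using List.reverseRecOn with
  | nil => rfl
  | append_singleton l p ih =>
    rw [List.map_append, List.map_cons, List.map_nil, firstOcc_append, ih, sigOrder_append]
    have hmapmap : (l.map (fun p => (p.1, sigOf p.2))).map Prod.snd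
        = l.map (fun p => sigOf p.2) := by rw [List.map_map]; rfl
    by_cases hmem : sigOf p.2 ∈ sigOrder l
    · have hm' : ((p.1, sigOf p.2).2 ∈ (l.map (fun p => (p.1, sigOf p.2))).map Prod.snd) := by
        rw [hmapmap]; exact (mem_sigOrder_iff_mem_map l _).1 hmem
      rw [if_pos hm', if_pos hmem, List.append_nil]
      exact (List.map_congr_left (fun s hs => by rw [sigFirst_append_of_mem p hs])).symm
    · have hm' : ¬ ((p.1, sigOf p.2).2 ∈ (l.map (fun p => (p.1, sigOf p.2))).map Prod.snd) := by
        rw [hmapmap]; exact fun hc => hmem ((mem_sigOrder_iff_mem_map l _).2 hc)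
      rw [if_neg hm', if_neg hmem, List.map_append]
      congr 1
      · exact (List.map_congr_left (fun s hs => by rw [sigFirst_append_of_mem p hs])).symm
      · have hmemsp : sigMems (l ++ [p]) (sigOf p.2) = [p.1] := by
          rw [sigMems_append_singleton, if_pos rfl, sigMems_eq_nil_of_not_mem hmem]; rfl
        have hfirstp : sigFirst (l ++ [p]) (sigOf p.2) = p.1 := by rw [sigFirst, hmemsp]; simp
        simp [hfirstp]

lemma pairs_filter_eq_sigMems (l : List (String × List (String × String)))
    (s : List (String × String)) :
    (((l.map (fun p => (p.1, sigOf p.2))).filter (fun q => q.2 == s)).map Prod.fst)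
      = sigMems l s := by
  rw [List.filter_map, List.map_map]
  rfl

-- ===== VERDICT (by name: the statement is the Claim_ definition above) =====
theorem equivalence_classes_spec : Claim_equal_equivalence_classes := by
  intro fsm _hDom hPre
  unfold Spec_equivalence_classes equivalence_classes equivalence_classes_alt
  dsimp only
  rw [foldA_char fsm hPre.1]
  have hrep : ((PySem.List.enumerate (fsm.map (fun p => (p.1, sigOf p.2)))).filter
      (fun ip => (PySem.List.slice (fsm.map (fun p => (p.1, sigOf p.2))) none (some ip.1)).all
        (fun q => q.2 != ip.2.2))).map Prod.snd
      = (sigOrder fsm).map (fun s => (sigFirst fsm s, s)) := firstOcc_pairs fsm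
  rw [hrep]
  have hc : (((sigOrder fsm).map (fun s => (sigFirst fsm s, s))).foldl
        (fun (d : PySem.Dict String (List String)) r =>
          d.insert r.1 (((fsm.map (fun p => (p.1, sigOf p.2))).filter
            (fun q => q.2 == r.2)).map Prod.fst)) PySem.Dict.empty).items
      = (sigOrder fsm).map (fun s => (sigFirst fsm s, sigMems fsm s)) := by
    refine Eq.trans (PySem.Dict.items_foldl_insert_fresh _ Prod.fst
        (fun r => ((fsm.map (fun p => (p.1, sigOf p.2))).filter
          (fun q => q.2 == r.2)).map Prod.fst) PySem.Dict.empty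
        (fun a _ => PySem.Dict.contains_empty _)
        (by simpa [List.map_map, Function.comp_def] using nodup_heads hPre.1)) ?_
    show ([] : List (String × List String)) ++ _ = _
    rw [List.nil_append, List.map_map]
    exact List.map_congr_left (fun s _ => by
      simp only [Function.comp_def]
      rw [pairs_filter_eq_sigMems])
  have hr : (((sigOrder fsm).map (fun s => (sigFirst fsm s, s))).foldl
        (fun (d : PySem.Dict (List (String × String)) String) r =>
          d.insert r.2 r.1) PySem.Dict.empty).items
      = (sigOrder fsm).map (fun s => (s, sigFirst fsm s)) := by
    refine Eq.trans (PySem.Dict.items_foldl_insert_fresh _ Prod.snd Prod.fst PySem.Dict.empty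
        (fun a _ => PySem.Dict.contains_empty _)
        (by simpa [List.map_map, Function.comp_def] using nodup_sigOrder fsm)) ?_
    show ([] : List (List (String × String) × String)) ++ _ = _
    rw [List.nil_append, List.map_map]
    rfl
  rw [hc, hr]
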